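-- pv_equiv track=rewrite | github.com/kunavamshi/gfg-potd | Difficulty: Medium/ASCII Range Sum/ascii-range-sum.py | asciirange
-- ===== SOURCE A (Python) =====
-- def asciirange(s):
--     result = []
--     positions = {}
--
--     # Record the first and last occurrence of each character
--     for i, ch in enumerate(s):
--         if ch not in positions:
--             positions[ch] = [i, i]
--         else:
--             positions[ch][1] = i
--
--     # For each character, if it appears more than once, compute sum between
--     for ch in positions:
--         start, end = positions[ch]
--         if start != end:  # Character appears more than once
--             ascii_sum = sum(ord(s[i]) for i in range(start + 1, end))
--             if ascii_sum > 0: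
--                 result.append(ascii_sum)
--
--     return result
-- ===== SOURCE B (Python) =====
-- def asciirange(s):
--     # Prefix sums of ASCII codes: pref[i] = sum of ord(s[j]) for j < i,
--     # so the sum strictly between positions a and b is pref[b] - pref[a+1].
--     pref = [0]
--     for ch in s:
--         pref.append(pref[-1] + ord(ch))
--     first = {}
--     last = {}
--     for i, ch in enumerate(s):
--         if ch not in first:
--             first[ch] = i
--         last[ch] = i
--     out = []
--     for ch in first:
--         a = first[ch]
--         b = last[ch]
--         if b - a > 1:
--             out.append(pref[b] - pref[a + 1])
--     return out
-- ===== Notes on version B (the rewrite author's own statement) =====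
-- stated objective: faster
-- what changed: B precomputes a prefix-sum array of ASCII codes and separate first/last occurrence maps, answering each character's between-sum in O(1) instead of re-summing the range per character.
import Mathlib
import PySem

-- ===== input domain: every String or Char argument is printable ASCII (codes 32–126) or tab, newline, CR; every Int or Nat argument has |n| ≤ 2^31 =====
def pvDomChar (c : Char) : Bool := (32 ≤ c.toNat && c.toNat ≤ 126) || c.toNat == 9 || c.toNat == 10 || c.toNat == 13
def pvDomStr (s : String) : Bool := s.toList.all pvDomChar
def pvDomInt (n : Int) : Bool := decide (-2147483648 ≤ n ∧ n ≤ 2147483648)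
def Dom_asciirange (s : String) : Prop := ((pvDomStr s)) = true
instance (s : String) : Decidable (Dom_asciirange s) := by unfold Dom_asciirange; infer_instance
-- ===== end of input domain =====

-- B computes each between-sum from a precomputed prefix-sum array and first/last occurrence maps instead of re-summing the range per character (objective: faster).


-- ===== PORT A =====
def asciirange (s : String) : List Int :=
  let cs := s.toList
  let positions : PySem.Dict Char (Int × Int) :=
    (PySem.List.enumerate cs).foldl (fun d p =>
      match d.get? p.2 with
      | none => d.insert p.2 (p.1, p.1)
      | some v => d.insert p.2 (v.1, p.1)) PySem.Dict.empty
  positions.keys.foldl (fun result ch =>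
    let se := positions.getD ch (0, 0)
    if se.1 ≠ se.2 then
      let asciiSum := (PySem.List.pyRange (se.1 + 1) se.2 1).foldl
        (fun acc i => acc + ((PySem.List.pyGet? cs i).map (fun c => (c.toNat : Int))).getD 0) 0
      if asciiSum > 0 then result ++ [asciiSum] else result
    else result) []

-- ===== PORT B =====
def asciirange_alt (s : String) : List Int :=
  let cs := s.toList
  let pref : List Int := cs.foldl (fun p ch => p ++ [PySem.List.pyGetD p (-1) 0 + (ch.toNat : Int)]) [0]
  let fl : PySem.Dict Char Int × PySem.Dict Char Int :=
    (PySem.List.enumerate cs).foldl (fun fl p =>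
      ((if fl.1.contains p.2 then fl.1 else fl.1.insert p.2 p.1), fl.2.insert p.2 p.1))
      (PySem.Dict.empty, PySem.Dict.empty)
  fl.1.keys.foldl (fun out ch =>
    let a := fl.1.getD ch 0
    let b := fl.2.getD ch 0
    if b - a > 1 then
      out ++ [PySem.List.pyGetD pref b 0 - PySem.List.pyGetD pref (a + 1) 0]
    else out) []

-- ===== PRECONDITION & SPEC =====
def Spec_asciirange (s : String) (out : List Int) : Prop := out = asciirange_alt s
instance (s : String) (out : List Int) : Decidable (Spec_asciirange s out) := by unfold Spec_asciirange; infer_instance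

-- ===== CLAIM =====
def Claim_equal_asciirange : Prop := ∀ (s : String), Dom_asciirange s → Spec_asciirange s (asciirange s)

-- ===== LEMMAS AND PROOFS =====

def sumTo (cs : List Char) (i : Nat) : Int := ((cs.take i).map (fun c => (c.toNat : Int))).sum

lemma sumTo_succ (cs : List Char) (m : Nat) (hm : m < cs.length) :
    sumTo cs (m + 1) = sumTo cs m + (cs[m].toNat : Int) := by
  simp only [sumTo, List.take_add_one, List.getElem?_eq_getElem hm, Option.toList_some,
    List.map_append, List.map_cons, List.map_nil, List.sum_append, List.sum_cons, List.sum_nil,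
    add_zero]

lemma pref_fold (l : List Char) (q : List Int) (x : Int) :
    l.foldl (fun p ch => p ++ [PySem.List.pyGetD p (-1) 0 + (ch.toNat : Int)]) (q ++ [x])
      = q ++ [x] ++ (List.range l.length).map (fun i => x + sumTo l (i + 1)) := by
  induction l generalizing q x with
  | nil => simp
  | cons c t ih =>
    simp only [List.foldl_cons, PySem.List.pyGetD_neg_one_append_singleton]
    rw [show q ++ [x] ++ [x + (c.toNat : Int)] = (q ++ [x]) ++ [x + (c.toNat : Int)] by simp]
    rw [ih (q ++ [x]) (x + (c.toNat : Int))]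
    simp only [List.length_cons, List.range_succ_eq_map, List.map_cons, List.map_map]
    have h1 : sumTo (c :: t) 1 = (c.toNat : Int) := by simp [sumTo]
    have h2 : ∀ i : Nat, sumTo (c :: t) (i + 1 + 1) = (c.toNat : Int) + sumTo t (i + 1) := by
      intro i; simp [sumTo, List.take_succ_cons]
    simp [h1, h2, Function.comp, add_assoc]

lemma pref_eq (cs : List Char) :
    cs.foldl (fun p ch => p ++ [PySem.List.pyGetD p (-1) 0 + (ch.toNat : Int)]) [0]
      = (List.range (cs.length + 1)).map (fun i => sumTo cs i) := by
  have := pref_fold cs [] 0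
  simp only [List.nil_append] at this
  rw [this, List.range_succ_eq_map]
  simp [sumTo, Function.comp]

lemma pref_get (cs : List Char) (b : Int) (h0 : 0 ≤ b) (hb : b ≤ (cs.length : Int)) :
    PySem.List.pyGetD ((List.range (cs.length + 1)).map (fun i => sumTo cs i)) b 0
      = sumTo cs b.toNat := by
  rw [PySem.List.pyGetD_eq_getElem _ 0 h0 (by simp; omega)]
  rw [List.getElem_map, List.getElem_range]

lemma sum_part (cs : List Char) (a : Int) (k : Nat) (h0 : 0 ≤ a) (hb : a + k ≤ (cs.length : Int)) :
    ((PySem.List.pyRange a (a + k) 1).map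
        (fun i => ((PySem.List.pyGet? cs i).map (fun c => (c.toNat : Int))).getD 0)).sum
      = sumTo cs (a + k).toNat - sumTo cs a.toNat := by
  induction k with
  | zero => simp [PySem.List.pyRange_one_eq_nil]
  | succ n ih =>
    have h1 : a + (n : Int) < cs.length := by push_cast at hb ⊢; omega
    rw [show ((n + 1 : Nat) : Int) = (n : Int) + 1 by push_cast; ring] at hb ⊢
    rw [show (a + ((n : Int) + 1)) = (a + n) + 1 by ring, PySem.List.pyRange_one_succ_right (by omega)]
    rw [List.map_append, List.sum_append]
    rw [ih (by omega)]
    have hg : PySem.List.pyGet? cs (a + n) = some cs[(a + (n:Int)).toNat] :=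
      PySem.List.pyGet?_eq_some_getElem _ (by omega) (by simpa using h1)
    have ht : ((a + (n:Int)) + 1).toNat = (a + (n:Int)).toNat + 1 := by omega
    rw [ht, sumTo_succ cs _ (by omega)]
    simp [hg]
    ring

def pvStepA (d : PySem.Dict Char (Int × Int)) (p : Int × Char) : PySem.Dict Char (Int × Int) :=
  match d.get? p.2 with
  | none => d.insert p.2 (p.1, p.1)
  | some v => d.insert p.2 (v.1, p.1)

def pvStepB (fl : PySem.Dict Char Int × PySem.Dict Char Int) (p : Int × Char) :
    PySem.Dict Char Int × PySem.Dict Char Int :=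
  ((if fl.1.contains p.2 then fl.1 else fl.1.insert p.2 p.1), fl.2.insert p.2 p.1)

def pvInv (n : Int) (P : PySem.Dict Char (Int × Int)) (F L : PySem.Dict Char Int) : Prop :=
  P.items = F.items.map (fun e => (e.1, (e.2, L.getD e.1 0))) ∧
  F.keys = L.keys ∧ F.keys.Nodup ∧
  ∀ e ∈ F.items, 0 ≤ e.2 ∧ e.2 ≤ L.getD e.1 0 ∧ L.getD e.1 0 < n

lemma pvKeys_eq (P : PySem.Dict Char (Int × Int)) (F L : PySem.Dict Char Int)
    (h : P.items = F.items.map (fun e => (e.1, (e.2, L.getD e.1 0)))) : P.keys = F.keys := by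
  simp only [PySem.Dict.keys, h, List.map_map]
  rfl

lemma pvInv_step (n : Int) (P : PySem.Dict Char (Int × Int)) (F L : PySem.Dict Char Int)
    (h0 : 0 ≤ n) (h : pvInv n P F L) (c : Char) :
    pvInv (n + 1) (pvStepA P (n, c)) (pvStepB (F, L) (n, c)).1 (pvStepB (F, L) (n, c)).2 := by
  obtain ⟨hitems, hkeys, hnd, hbnd⟩ := h
  have hPkeys : P.keys = F.keys := pvKeys_eq P F L hitems
  by_cases hc : F.contains c = true
  · -- repeat key: A updates second component, B updates L
    obtain ⟨a, ha⟩ : ∃ a, F.get? c = some a := by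
      rcases h' : F.get? c with _ | a
      · rw [PySem.Dict.get?_eq_none_iff_contains] at h'; simp [hc] at h'
      · exact ⟨a, rfl⟩
    have haF : (c, a) ∈ F.items := PySem.Dict.mem_items_of_get?_eq_some _ ha
    have haP : (c, (a, L.getD c 0)) ∈ P.items := by
      rw [hitems]; exact List.mem_map.mpr ⟨(c, a), haF, rfl⟩
    have hPnd : P.keys.Nodup := hPkeys ▸ hnd
    have hPget : P.get? c = some (a, L.getD c 0) := PySem.Dict.get?_of_mem_items _ haP hPnd
    have hcK : c ∈ F.keys := (PySem.Dict.contains_iff_mem_keys F c).mp hc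
    have hPc : P.contains c = true := by
      rw [PySem.Dict.contains_iff_mem_keys, hPkeys]; exact hcK
    have hLc : L.contains c = true := by
      rw [PySem.Dict.contains_iff_mem_keys, ← hkeys]; exact hcK
    simp only [pvStepA, pvStepB, hPget, hc, if_pos]
    refine ⟨?_, ?_, hnd, ?_⟩
    · rw [PySem.Dict.items_insert_of_contains _ _ hPc, hitems, List.map_map]
      apply List.map_congr_left
      intro e he
      by_cases hec : e.1 = c
      · have : F.get? e.1 = some e.2 := PySem.Dict.get?_of_mem_items _ (by rwa [← Prod.mk.eta (p := e)] at he) hnd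
        have hea : e.2 = a := by rw [hec] at this; rw [this] at ha; exact (Option.some.injEq _ _).mp ha
        simp [Function.comp, hec, hea, PySem.Dict.getD_insert_self]
      · simp [Function.comp, hec, PySem.Dict.getD_insert_of_ne _ _ _ hec]
    · rw [hkeys, PySem.Dict.keys_insert_of_contains _ _ hLc]
    · intro e he
      obtain ⟨h1, h2, h3⟩ := hbnd e he
      by_cases hec : e.1 = c
      · have : F.get? e.1 = some e.2 := PySem.Dict.get?_of_mem_items _ (by rwa [← Prod.mk.eta (p := e)] at he) hnd
        rw [hec, PySem.Dict.getD_insert_self]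
        rw [hec] at h2 h3
        exact ⟨h1, by omega, by omega⟩
      · rw [PySem.Dict.getD_insert_of_ne _ _ _ hec]
        exact ⟨h1, h2, by omega⟩
  · -- fresh key: both append
    have hcF : F.contains c = false := by simpa using hc
    have hcKn : c ∉ F.keys := fun hm => hc ((PySem.Dict.contains_iff_mem_keys F c).mpr hm)
    have hcL : L.contains c = false :=
      Bool.eq_false_iff.mpr (fun hh => hcKn (by rw [hkeys]; exact (PySem.Dict.contains_iff_mem_keys L c).mp hh))
    have hPc : P.contains c = false :=
      Bool.eq_false_iff.mpr (fun hh => hcKn (by rw [← hPkeys]; exact (PySem.Dict.contains_iff_mem_keys P c).mp hh))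
    have hPget : P.get? c = none := (PySem.Dict.get?_eq_none_iff_contains P c).mpr hPc
    simp only [pvStepA, pvStepB, hPget, hcF, Bool.false_eq_true, if_false]
    refine ⟨?_, ?_, ?_, ?_⟩
    · rw [PySem.Dict.items_insert_of_not_contains _ _ hPc,
          PySem.Dict.items_insert_of_not_contains _ _ hcF, hitems, List.map_append]
      congr 1
      · apply List.map_congr_left
        intro e he
        have hec : e.1 ≠ c := by
          intro hh
          have : e.1 ∈ F.keys := PySem.Dict.mem_keys_of_mem_items F he
          rw [hh] at this
          exact hcKn this
        simp [PySem.Dict.getD_insert_of_ne _ _ _ hec]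
      · simp [PySem.Dict.getD_insert_self]
    · rw [PySem.Dict.keys_insert_of_not_contains _ _ hcF,
          PySem.Dict.keys_insert_of_not_contains _ _ hcL, hkeys]
    · exact PySem.Dict.nodup_keys_insert _ _ _ hnd
    · intro e he
      rw [PySem.Dict.items_insert_of_not_contains _ _ hcF] at he
      rcases List.mem_append.mp he with he | he
      · obtain ⟨h1, h2, h3⟩ := hbnd e he
        have hec : e.1 ≠ c := by
          intro hh
          have : e.1 ∈ F.keys := PySem.Dict.mem_keys_of_mem_items F he
          rw [hh] at this
          exact hcKn this
        rw [PySem.Dict.getD_insert_of_ne _ _ _ hec]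
        exact ⟨h1, h2, by omega⟩
      · simp only [List.mem_singleton] at he
        subst he
        simp only [PySem.Dict.getD_insert_self]
        exact ⟨h0, le_refl _, by omega⟩

lemma pvSum_pos (cs : List Char) (hdom : ∀ c ∈ cs, pvDomChar c = true)
    (a b : Int) (h0 : 0 ≤ a) (hab : a < b) (hb : b ≤ (cs.length : Int)) :
    0 < ((PySem.List.pyRange a b 1).map
        (fun i => ((PySem.List.pyGet? cs i).map (fun c => (c.toNat : Int))).getD 0)).sum := by
  apply List.sum_pos
  · intro x hx
    obtain ⟨i, hi, hgi⟩ := List.mem_map.mp hx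
    obtain ⟨h1, h2⟩ := PySem.List.mem_pyRange_one.mp hi
    have hlt : i < (cs.length : Int) := lt_of_lt_of_le h2 hb
    have h0i : (0 : Int) ≤ i := le_trans h0 h1
    have hg : PySem.List.pyGet? cs i = some cs[i.toNat] :=
      PySem.List.pyGet?_eq_some_getElem cs h0i hlt
    rw [hg] at hgi
    have hmem : cs[i.toNat] ∈ cs := List.getElem_mem _
    have hd := hdom _ hmem
    simp only [pvDomChar, Bool.or_eq_true, Bool.and_eq_true, decide_eq_true_eq, beq_iff_eq] at hd
    simp only [Option.map_some, Option.getD_some] at hgi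
    rw [← hgi]
    have : 0 < cs[i.toNat].toNat := by omega
    exact_mod_cast this
  · intro hnil
    have hl : (PySem.List.pyRange a b 1).length = 0 := by
      rw [← List.length_map (f := fun i => ((PySem.List.pyGet? cs i).map (fun c => (c.toNat : Int))).getD 0), hnil]
      rfl
    rw [PySem.List.length_pyRange_one] at hl
    omega

lemma pvInv_all (cs : List Char) :
    pvInv (cs.length : Int)
      ((PySem.List.enumerate cs).foldl pvStepA PySem.Dict.empty)
      ((PySem.List.enumerate cs).foldl pvStepB (PySem.Dict.empty, PySem.Dict.empty)).1
      ((PySem.List.enumerate cs).foldl pvStepB (PySem.Dict.empty, PySem.Dict.empty)).2 := by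
  induction cs using List.reverseRecOn with
  | nil =>
    refine ⟨rfl, rfl, List.nodup_nil, ?_⟩
    intro e he
    simp [PySem.Dict.empty, PySem.List.enumerate_nil] at he
  | append_singleton t c ih =>
    rw [PySem.List.enumerate_append]
    have h1 : PySem.List.enumerate [c] (0 + (t.length : Int)) = [((t.length : Int), c)] := by
      rw [PySem.List.enumerate_cons, PySem.List.enumerate_nil]
      norm_num
    rw [h1, List.foldl_append, List.foldl_append, List.foldl_cons, List.foldl_nil,
        List.foldl_cons, List.foldl_nil]
    have hlen : ((t ++ [c]).length : Int) = (t.length : Int) + 1 := by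
      simp
    rw [hlen]
    exact pvInv_step _ _ _ _ (by positivity) ih c

lemma pv_main (cs : List Char) (hdom : ∀ c ∈ cs, pvDomChar c = true) :
    (((PySem.List.enumerate cs).foldl pvStepA PySem.Dict.empty).keys.foldl
      (fun result ch =>
        let se := ((PySem.List.enumerate cs).foldl pvStepA PySem.Dict.empty).getD ch (0, 0)
        if se.1 ≠ se.2 then
          let asciiSum := (PySem.List.pyRange (se.1 + 1) se.2 1).foldl
            (fun acc i => acc + ((PySem.List.pyGet? cs i).map (fun c => (c.toNat : Int))).getD 0) 0
          if asciiSum > 0 then result ++ [asciiSum] else result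
        else result) [])
    = (((PySem.List.enumerate cs).foldl pvStepB (PySem.Dict.empty, PySem.Dict.empty)).1.keys.foldl
      (fun out ch =>
        let a := ((PySem.List.enumerate cs).foldl pvStepB (PySem.Dict.empty, PySem.Dict.empty)).1.getD ch 0
        let b := ((PySem.List.enumerate cs).foldl pvStepB (PySem.Dict.empty, PySem.Dict.empty)).2.getD ch 0
        if b - a > 1 then
          out ++ [PySem.List.pyGetD (cs.foldl (fun p ch => p ++ [PySem.List.pyGetD p (-1) 0 + (ch.toNat : Int)]) [0]) b 0
                  - PySem.List.pyGetD (cs.foldl (fun p ch => p ++ [PySem.List.pyGetD p (-1) 0 + (ch.toNat : Int)]) [0]) (a + 1) 0]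
        else out) []) := by
  obtain ⟨hitems, hkeys, hnd, hbnd⟩ := pvInv_all cs
  set P := (PySem.List.enumerate cs).foldl pvStepA PySem.Dict.empty with hP
  set FL := (PySem.List.enumerate cs).foldl pvStepB (PySem.Dict.empty, PySem.Dict.empty) with hFL
  have hPkeys : P.keys = FL.1.keys := pvKeys_eq _ _ _ hitems
  rw [pref_eq cs, hPkeys]
  apply PySem.List.foldl_congr_mem
  intro acc ch hch
  obtain ⟨a, ha⟩ : ∃ a, FL.1.get? ch = some a := by
    rcases h' : FL.1.get? ch with _ | a
    · rw [PySem.Dict.get?_eq_none_iff_not_mem_keys] at h'; exact absurd hch h'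
    · exact ⟨a, rfl⟩
  have haF : (ch, a) ∈ FL.1.items := PySem.Dict.mem_items_of_get?_eq_some _ ha
  obtain ⟨hb0, hble, hblt⟩ := hbnd _ haF
  simp only at hb0 hble hblt
  set b := FL.2.getD ch 0 with hbdef
  have hPg : P.getD ch (0, 0) = (a, b) := by
    apply PySem.Dict.getD_of_mem_items
    · rw [hitems]; exact List.mem_map.mpr ⟨(ch, a), haF, rfl⟩
    · rw [hPkeys]; exact hnd
  have hFg : FL.1.getD ch 0 = a := PySem.Dict.getD_of_get?_eq_some _ _ ha
  simp only [hPg, hFg]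
  by_cases hgt : b - a > 1
  · have hne : a ≠ b := by omega
    have hs := sum_part cs (a + 1) (b - a - 1).toNat (by omega) (by omega)
    rw [show (a + 1) + (((b - a - 1).toNat : Nat) : Int) = b by omega] at hs
    have hpos := pvSum_pos cs hdom (a + 1) b (by omega) (by omega) (by omega)
    rw [hs] at hpos
    simp only [ne_eq, hne, not_false_eq_true, if_true]
    rw [PySem.List.foldl_add, zero_add, hs, if_pos hpos, if_pos hgt]
    rw [pref_get cs b (by omega) (by omega), pref_get cs (a + 1) (by omega) (by omega)]
  · by_cases heq : a = b
    · simp [heq]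
    · have hb1 : b = a + 1 := by omega
      have hnil : PySem.List.pyRange (a + 1) b 1 = [] := PySem.List.pyRange_one_eq_nil (by omega)
      simp only [heq, hgt, ne_eq, not_false_eq_true, if_true, if_false, hnil, List.foldl_nil]
      norm_num

-- ===== VERDICT =====
theorem asciirange_spec : Claim_equal_asciirange := by
  intro s hdom
  show asciirange s = asciirange_alt s
  have hdom' : ∀ c ∈ s.toList, pvDomChar c = true := by
    have := hdom
    unfold Dom_asciirange pvDomStr at this
    exact fun c hc => List.all_eq_true.mp this c hc
  exact pv_main s.toList hdom'
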